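-- pv_equiv track=rewrite | github.com/yunko006/running-visualisation | utils.py | accumulatedKm
-- ===== SOURCE A (Python) =====
-- def accumulatedKm(defaultdict):
--     """
--     sum all the km in the database
--     take a dictionnary
--     return a list
--     """
--     accumule = 0
--     acc_list = []
--     for key in defaultdict:
--         for i in defaultdict[key]:
--             accumule += i
--         acc_list.append(accumule)
--     return acc_list
-- ===== SOURCE B (Python) =====
-- def accumulatedKm(defaultdict):
--     # Different algorithm: first compute the grand total of all km, then build the
--     # result BACK-TO-FRONT: walking the keys in reverse, each position gets the
--     # current remaining total, and the key's own subtotal is subtracted before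
--     # moving left. Finally the list is reversed into place.
--     total = sum(sum(vals) for vals in defaultdict.values())
--     out = []
--     for vals in reversed(list(defaultdict.values())):
--         out.append(total)
--         total -= sum(vals)
--     out.reverse()
--     return out
-- ===== Notes on version B (the rewrite author's own statement) =====
-- stated objective: alternative
-- what changed: A makes one forward pass with a running accumulator added element by element; B computes the grand total first and then builds the output back-to-front, walking the values in reverse and subtracting each key's subtotal from the remaining total, reversing at the end.
import Mathlib
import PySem

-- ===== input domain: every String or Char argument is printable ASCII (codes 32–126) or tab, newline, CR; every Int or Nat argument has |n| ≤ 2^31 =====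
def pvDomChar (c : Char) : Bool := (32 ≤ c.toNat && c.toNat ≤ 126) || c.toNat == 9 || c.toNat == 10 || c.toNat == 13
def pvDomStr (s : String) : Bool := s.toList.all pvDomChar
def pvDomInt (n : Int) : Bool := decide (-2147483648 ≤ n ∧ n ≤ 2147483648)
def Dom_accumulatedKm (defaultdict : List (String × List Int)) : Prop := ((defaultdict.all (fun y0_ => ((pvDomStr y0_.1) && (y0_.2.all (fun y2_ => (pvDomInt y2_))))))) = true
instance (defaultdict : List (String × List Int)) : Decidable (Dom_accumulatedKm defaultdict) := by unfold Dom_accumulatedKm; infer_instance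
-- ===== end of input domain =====

-- B replaces A's forward running-accumulator pass with a grand-total-first, back-to-front
-- construction that subtracts each key's subtotal while walking the values in reverse; objective: alternative.


-- ===== PORT A =====
-- `for key in defaultdict` iterates the keys; `defaultdict[key]` is a first-match lookup.
def accumulatedKm (defaultdict : List (String × List Int)) : List Int :=
  ((defaultdict.map Prod.fst).foldl
    (fun (st : Int × List Int) key =>
      let accumule := ((List.lookup key defaultdict).getD []).foldl (fun a i => a + i) st.1
      (accumule, st.2 ++ [accumule]))
    (0, [])).2

-- ===== PORT B =====
def accumulatedKm_alt (defaultdict : List (String × List Int)) : List Int :=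
  let total : Int := (defaultdict.map (fun kv => kv.2.sum)).sum
  (((defaultdict.map Prod.snd).reverse.foldl
      (fun (st : Int × List Int) vals => (st.1 - vals.sum, st.2 ++ [st.1]))
      (total, [])).2).reverse

-- ===== PRECONDITION & SPEC =====
-- Pre_ requires distinct keys: that is the invariant of the Python dict this association
-- list represents, and a real dict input can never violate it.
def Pre_accumulatedKm (defaultdict : List (String × List Int)) : Prop :=
  (defaultdict.map Prod.fst).Nodup
instance (defaultdict : List (String × List Int)) : Decidable (Pre_accumulatedKm defaultdict) := by unfold Pre_accumulatedKm; infer_instance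
def pvWitness_accumulatedKm : (List (String × List Int)) := [("a", [1, 2]), ("b", []), ("c", [3])]

def Spec_accumulatedKm (defaultdict : List (String × List Int)) (out : List Int) : Prop := out = accumulatedKm_alt defaultdict
instance (defaultdict : List (String × List Int)) (out : List Int) : Decidable (Spec_accumulatedKm defaultdict out) := by unfold Spec_accumulatedKm; infer_instance

-- ===== CLAIM (what is proved, stated in full; the proofs are below) =====
def Claim_equal_accumulatedKm : Prop := ∀ (defaultdict : List (String × List Int)), Dom_accumulatedKm defaultdict → Pre_accumulatedKm defaultdict → Spec_accumulatedKm defaultdict (accumulatedKm defaultdict)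

-- ===== LEMMAS AND PROOFS =====

-- The partial-sums list both programs compute: running totals starting from `a`.
def prefixSums (a : Int) : List Int → List Int
  | [] => []
  | x :: xs => (a + x) :: prefixSums (a + x) xs

theorem foldl_add_sum (v : List Int) (acc : Int) : v.foldl (fun a i => a + i) acc = acc + v.sum := by
  induction v generalizing acc with
  | nil => simp
  | cons x xs ih => simp [List.foldl_cons, ih, add_assoc]

-- On a nodup association list, looking up the key of any member yields its value.
theorem lookup_of_mem_nodup (d : List (String × List Int))
    (hnd : (d.map Prod.fst).Nodup) :
    ∀ kv ∈ d, (List.lookup kv.1 d).getD [] = kv.2 := by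
  induction d with
  | nil => intro kv h; cases h
  | cons hd t ih =>
    intro kv hmem
    simp only [List.map_cons, List.nodup_cons] at hnd
    rcases List.mem_cons.mp hmem with h | h
    · subst h; simp [List.lookup]
    · have hkey : kv.1 ∈ t.map Prod.fst := by
        simp only [List.mem_map]; exact ⟨kv, h, rfl⟩
      have hb : (kv.1 == hd.1) = false := by
        refine beq_false_of_ne fun he => hnd.1 ?_
        rwa [he] at hkey
      simp only [List.lookup, hb]
      exact ih hnd.2 kv h

-- A's fused fold produces the prefix sums of the per-key subtotals.
theorem foldA_eq_prefixSums (d t : List (String × List Int))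
    (h : ∀ kv ∈ t, (List.lookup kv.1 d).getD [] = kv.2) (a : Int) (out : List Int) :
    (t.map Prod.fst).foldl
      (fun (st : Int × List Int) key =>
        let accumule := ((List.lookup key d).getD []).foldl (fun a i => a + i) st.1
        (accumule, st.2 ++ [accumule])) (a, out)
    = (a + (t.map (fun kv => kv.2.sum)).sum, out ++ prefixSums a (t.map (fun kv => kv.2.sum))) := by
  induction t generalizing a out with
  | nil => simp [prefixSums]
  | cons hd tl ih =>
    simp only [List.map_cons, List.foldl_cons]
    rw [h hd (List.mem_cons_self ..), foldl_add_sum,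
      ih (fun kv hk => h kv (List.mem_cons_of_mem _ hk))]
    simp [prefixSums, add_assoc]

-- B's backward fold (written as a foldr) yields the prefix sums, reversed.
theorem foldrB_eq_prefixSums (l : List (List Int)) (T : Int) :
    l.foldr (fun vals (st : Int × List Int) => (st.1 - vals.sum, st.2 ++ [st.1])) (T, [])
    = (T - (l.map List.sum).sum,
       (prefixSums (T - (l.map List.sum).sum) (l.map List.sum)).reverse) := by
  induction l with
  | nil => simp [prefixSums]
  | cons x xs ih =>
    simp only [List.foldr_cons, ih, List.map_cons, List.sum_cons]
    have h1 : T - (x.sum + (xs.map List.sum).sum) + x.sum = T - (xs.map List.sum).sum := by ring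
    simp [prefixSums, h1]
    ring

-- ===== VERDICT (by name: the statement is the Claim_ definition above) =====
theorem accumulatedKm_spec : Claim_equal_accumulatedKm := by
  intro d _ hpre
  unfold Spec_accumulatedKm accumulatedKm accumulatedKm_alt
  rw [foldA_eq_prefixSums d d (lookup_of_mem_nodup d hpre) 0 []]
  simp only [List.foldl_reverse, foldrB_eq_prefixSums, List.map_map, Function.comp_def]
  simp
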